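-- pv_equiv track=rewrite | github.com/webclinic017/pytho | helpers/prices/data.py | _parse_dates
-- ===== SOURCE A (Python) =====
-- from typing import Any, Callable, Dict, List, Optional, Type, TypeVar, Union, TypedDict
--
-- FundiesStruct = Dict[str, Dict[str, Union[float, str]]]
--
-- def _parse_dates(statement: FundiesStruct) -> List[float]:
--     ##We can have multiple dates for one year of results, likely due to restatments
--     ##and differences between prelim/annual reporting. For dates, we just want to
--     ##display the first date to the user because that is the period end for the
--     ##results
--     res: List[float] = []
--     last_year = -1
--     for date in statement:
--         curr_year = date[0:4]
--         if last_year == curr_year: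
--             res[-1] = date
--         else:
--             res.append(date)
--             last_year = curr_year
--     return res
-- ===== SOURCE B (Python) =====
-- def _parse_dates(statement):
--     # Keep a date exactly when the NEXT date starts a different year (or it is last):
--     # filter adjacent pairs, then append the final element. No state is tracked and
--     # nothing is overwritten, unlike A's last_year accumulator with res[-1] rewrites.
--     dates = list(statement)
--     return [a for a, b in zip(dates, dates[1:]) if a[0:4] != b[0:4]] + dates[-1:]
-- ===== Notes on version B (the rewrite author's own statement) =====
-- stated objective: simpler
-- what changed: Replaces A's stateful pass (tracking last_year and overwriting res[-1]) with a stateless adjacent-pair filter: keep each date whose successor has a different 4-char year prefix, plus the final date.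
import Mathlib
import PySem

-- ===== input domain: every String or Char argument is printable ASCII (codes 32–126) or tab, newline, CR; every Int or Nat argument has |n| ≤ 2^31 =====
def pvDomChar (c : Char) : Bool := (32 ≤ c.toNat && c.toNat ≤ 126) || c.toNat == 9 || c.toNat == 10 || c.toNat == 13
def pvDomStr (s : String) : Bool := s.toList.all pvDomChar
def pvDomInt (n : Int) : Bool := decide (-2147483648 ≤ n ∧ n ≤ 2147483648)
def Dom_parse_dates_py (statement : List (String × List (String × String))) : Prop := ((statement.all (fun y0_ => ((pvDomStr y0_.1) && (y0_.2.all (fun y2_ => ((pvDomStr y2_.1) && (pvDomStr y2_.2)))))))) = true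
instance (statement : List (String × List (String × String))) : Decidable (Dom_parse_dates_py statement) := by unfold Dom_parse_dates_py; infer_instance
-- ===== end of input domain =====

-- ===== PORT A =====
-- B replaces A's stateful last_year/res[-1]-overwrite pass with a stateless
-- adjacent-pair filter plus the final element (simpler; same cost).

-- Python's overwrite of the last list element (nonempty whenever that branch runs)
def pvSetLast (xs : List String) (v : String) : List String := xs.dropLast ++ [v]

-- `last_year = -1` (an int) never equals a string slice, so last_year is
-- Option String, none initially (none matches no slice).
def parse_dates_py (statement : List (String × List (String × String))) : List String :=
  ((PySem.Dict.ofList statement).keys.foldl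
    (fun (st : List String × Option String) date =>
      let curr_year := PySem.Str.slice date (some 0) (some 4)
      if st.2 == some curr_year then
        (pvSetLast st.1 date, st.2)
      else
        (st.1 ++ [date], some curr_year))
    ([], none)).1

-- ===== PORT B =====
def pvKey (d : String) : String := PySem.Str.slice d (some 0) (some 4)

-- zip(dates, dates[1:]) filtered on differing year prefixes, plus dates[-1:]
def parse_dates_py_alt (statement : List (String × List (String × String))) : List String :=
  let dates := (PySem.Dict.ofList statement).keys
  ((dates.zip (PySem.List.slice dates (some 1) none)).filterMap
      (fun p => if pvKey p.1 != pvKey p.2 then some p.1 else none))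
    ++ PySem.List.slice dates (some (-1)) none

-- ===== PRECONDITION & SPEC =====
def Spec_parse_dates_py (statement : List (String × List (String × String))) (out : List String) : Prop := out = parse_dates_py_alt statement
instance (statement : List (String × List (String × String))) (out : List String) : Decidable (Spec_parse_dates_py statement out) := by unfold Spec_parse_dates_py; infer_instance

-- ===== CLAIM (what is proved, stated in full; the proofs are below) =====
def Claim_equal_parse_dates_py : Prop := ∀ (statement : List (String × List (String × String))), Dom_parse_dates_py statement → Spec_parse_dates_py statement (parse_dates_py statement)

-- ===== LEMMAS AND PROOFS =====

-- common recursive characterisation: keep each element whose successor has a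
-- different key, and always the last one
def pvKeepLast : List String → List String
  | [] => []
  | [d] => [d]
  | d :: e :: rest =>
    if pvKey d == pvKey e then pvKeepLast (e :: rest) else d :: pvKeepLast (e :: rest)

-- A's fold step, named for the proofs (definitionally the port's lambda)
def pvStep (st : List String × Option String) (date : String) : List String × Option String :=
  let curr_year := PySem.Str.slice date (some 0) (some 4)
  if st.2 == some curr_year then (pvSetLast st.1 date, st.2)
  else (st.1 ++ [date], some curr_year)

-- A-side loop invariant
theorem pv_loop_eq (rest : List String) : ∀ (acc : List String) (cur : String),
    (rest.foldl pvStep (acc ++ [cur], some (pvKey cur))).1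
    = acc ++ pvKeepLast (cur :: rest) := by
  induction rest with
  | nil => intro acc cur; simp [pvKeepLast]
  | cons d rest ih =>
    intro acc cur
    rw [List.foldl_cons]
    by_cases h : pvKey cur = pvKey d
    · have hstep : pvStep (acc ++ [cur], some (pvKey cur)) d = (acc ++ [d], some (pvKey d)) := by
        simp only [pvKey] at h
        simp [pvStep, pvSetLast, h, pvKey]
      rw [hstep, ih acc d]
      simp [pvKeepLast, h]
    · have hstep : pvStep (acc ++ [cur], some (pvKey cur)) d
          = ((acc ++ [cur]) ++ [d], some (pvKey d)) := by
        simp only [pvKey] at h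
        simp [pvStep, h, pvKey]
      rw [hstep, ih (acc ++ [cur]) d]
      simp [pvKeepLast, h]

theorem pv_A_eq (dates : List String) :
    (dates.foldl pvStep ([], none)).1 = pvKeepLast dates := by
  cases dates with
  | nil => simp [pvKeepLast]
  | cons d rest =>
    rw [List.foldl_cons,
        show pvStep ([], none) d = ([] ++ [d], some (pvKey d)) from by simp [pvStep, pvKey],
        pv_loop_eq rest [] d]
    simp

-- B-side: the zip-filter-plus-last computation also equals pvKeepLast
theorem pv_B_eq (dates : List String) :
    ((dates.zip (PySem.List.slice dates (some 1) none)).filterMap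
        (fun p => if pvKey p.1 != pvKey p.2 then some p.1 else none))
      ++ PySem.List.slice dates (some (-1)) none
    = pvKeepLast dates := by
  rw [PySem.List.slice_from_one, PySem.List.slice_from_neg_one]
  induction dates with
  | nil => simp [pvKeepLast]
  | cons d rest ih =>
    cases rest with
    | nil => simp [pvKeepLast]
    | cons e rest' =>
      simp only [List.tail_cons] at ih ⊢
      rw [show (d :: e :: rest').zip (e :: rest') = (d, e) :: (e :: rest').zip rest' from rfl,
          List.filterMap_cons]
      have hdrop : (d :: e :: rest').drop ((d :: e :: rest').length - 1)
          = (e :: rest').drop ((e :: rest').length - 1) := by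
        simp [List.length_cons]
      rw [hdrop]
      by_cases h : pvKey d = pvKey e
      · simp only [h, bne_self_eq_false, Bool.false_eq_true, reduceIte]
        rw [ih]
        simp [pvKeepLast, h]
      · have hb : (pvKey d != pvKey e) = true := by simp [h]
        simp only [hb, reduceIte]
        rw [List.cons_append, ih]
        simp [pvKeepLast, h]

-- ===== VERDICT (by name: the statement is the Claim_ definition above) =====
theorem parse_dates_py_spec : Claim_equal_parse_dates_py := by
  intro statement _
  show parse_dates_py statement = parse_dates_py_alt statement
  have hA : parse_dates_py statement
      = ((PySem.Dict.ofList statement).keys.foldl pvStep ([], none)).1 := rfl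
  rw [hA, pv_A_eq, ← pv_B_eq]
  rfl
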